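-- pv_equiv track=rewrite | github.com/PrestonLaw/CSE535-Project4 | trending_topics/cluster2.py | ascii_only
-- ===== SOURCE A (Python) =====
-- import string
--
-- def ascii_only(in_str):
--     tmp = []
--     for c in in_str:
--         if c in string.ascii_letters:
--             tmp.append(c)
--         else:
--             tmp.append(' ')
--     return ''.join(tmp)
-- ===== SOURCE B (Python) =====
-- import re
--
-- _NON_LETTER = re.compile(r'[^A-Za-z]')
--
-- def ascii_only(in_str):
--     return _NON_LETTER.sub(' ', in_str)
-- ===== Notes on version B (the rewrite author's own statement) =====
-- stated objective: idiomatic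
-- what changed: Replaces the explicit per-character loop, list accumulator and ascii_letters membership test by a single compiled regex substitution of the class [^A-Za-z] with a space.
import Mathlib
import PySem

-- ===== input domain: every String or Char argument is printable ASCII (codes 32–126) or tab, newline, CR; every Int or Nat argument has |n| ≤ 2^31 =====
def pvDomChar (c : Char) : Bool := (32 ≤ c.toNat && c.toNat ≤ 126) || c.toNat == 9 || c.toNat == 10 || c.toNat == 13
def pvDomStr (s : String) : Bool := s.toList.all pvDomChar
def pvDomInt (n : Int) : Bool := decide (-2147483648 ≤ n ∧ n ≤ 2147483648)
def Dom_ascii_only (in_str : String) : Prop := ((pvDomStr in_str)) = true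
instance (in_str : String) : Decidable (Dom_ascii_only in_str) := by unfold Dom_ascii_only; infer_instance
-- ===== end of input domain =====

-- B replaces A's explicit loop/accumulator with a single regex substitution [^A-Za-z] -> ' ' (idiomatic; same O(n) cost).

-- ===== PORT A =====
-- string.ascii_letters
def asciiLettersA : List Char := "abcdefghijklmnopqrstuvwxyzABCDEFGHIJKLMNOPQRSTUVWXYZ".toList

def ascii_only (in_str : String) : String :=
  String.mk (in_str.toList.foldl
    (fun tmp c => tmp ++ [if c ∈ asciiLettersA then c else ' ']) [])

-- ===== PORT B =====
-- re.sub(r'[^A-Za-z]', ' ', in_str): each char not in the class [A-Za-z] is replaced by ' ';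
-- the regex engine's per-character substitution is ported as a map with the class test [A-Za-z].
def ascii_only_alt (in_str : String) : String :=
  String.mk (in_str.toList.map
    (fun c => if ('A' ≤ c ∧ c ≤ 'Z') ∨ ('a' ≤ c ∧ c ≤ 'z') then c else ' '))

-- ===== PRECONDITION & SPEC =====
def Spec_ascii_only (in_str : String) (out : String) : Prop := out = ascii_only_alt in_str
instance (in_str : String) (out : String) : Decidable (Spec_ascii_only in_str out) := by unfold Spec_ascii_only; infer_instance

-- ===== CLAIM (what is proved, stated in full; the proofs are below) =====
def Claim_equal_ascii_only : Prop := ∀ (in_str : String), Dom_ascii_only in_str → Spec_ascii_only in_str (ascii_only in_str)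

-- ===== LEMMAS AND PROOFS =====

lemma charLe_iff (a c : Char) : a ≤ c ↔ a.toNat ≤ c.toNat := by
  rw [Char.le_def, UInt32.le_iff_toNat_le]
  exact Iff.rfl

lemma codes_eq : asciiLettersA.map Char.toNat =
    [97,98,99,100,101,102,103,104,105,106,107,108,109,110,111,112,113,114,115,116,117,118,119,120,121,122,65,66,67,68,69,70,71,72,73,74,75,76,77,78,79,80,81,82,83,84,85,86,87,88,89,90] := by
  decide

lemma natmem (n : ℕ) :
    n ∈ ([97,98,99,100,101,102,103,104,105,106,107,108,109,110,111,112,113,114,115,116,117,118,119,120,121,122,65,66,67,68,69,70,71,72,73,74,75,76,77,78,79,80,81,82,83,84,85,86,87,88,89,90] : List ℕ)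
      ↔ (97 ≤ n ∧ n ≤ 122) ∨ (65 ≤ n ∧ n ≤ 90) := by
  simp only [List.mem_cons, List.not_mem_nil, or_false]
  omega

lemma mem_letters (c : Char) :
    (c ∈ asciiLettersA) ↔ (('A' ≤ c ∧ c ≤ 'Z') ∨ ('a' ≤ c ∧ c ≤ 'z')) := by
  have h1 : c ∈ asciiLettersA ↔ c.toNat ∈ asciiLettersA.map Char.toNat := by
    constructor
    · exact List.mem_map_of_mem
    · intro h
      obtain ⟨d, hd, hdc⟩ := List.mem_map.mp h
      have hv : d.val = c.val := UInt32.toNat_inj.mp hdc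
      have : d = c := by
        cases d; cases c; cases hv; rfl
      exact this ▸ hd
  rw [h1, codes_eq, natmem, charLe_iff, charLe_iff, charLe_iff, charLe_iff]
  constructor
  · rintro (⟨a, b⟩ | ⟨a, b⟩)
    · right; exact ⟨a, b⟩
    · left; exact ⟨a, b⟩
  · rintro (⟨a, b⟩ | ⟨a, b⟩)
    · right; exact ⟨a, b⟩
    · left; exact ⟨a, b⟩

lemma foldl_append_singleton (f : Char → Char) :
    ∀ (l : List Char) (acc : List Char),
      l.foldl (fun tmp c => tmp ++ [f c]) acc = acc ++ l.map f := by
  intro l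
  induction l with
  | nil => intro acc; simp
  | cons x xs ih =>
      intro acc
      simp [List.foldl_cons, ih (acc ++ [f x]), List.append_assoc]

-- ===== VERDICT (by name: the statement is the Claim_ definition above) =====
theorem ascii_only_spec : Claim_equal_ascii_only := by
  intro s _
  show ascii_only s = ascii_only_alt s
  unfold ascii_only ascii_only_alt
  rw [foldl_append_singleton (fun c => if c ∈ asciiLettersA then c else ' ') s.toList []]
  simp only [List.nil_append]
  congr 1
  apply List.map_congr_left
  intro c _
  exact if_congr (mem_letters c) rfl rfl
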